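-- pv_equiv track=rewrite | github.com/thisIsJooS/Algorithm-Problem-Solving | BOJ/20327.py | oper7
-- ===== SOURCE A (Python) =====
-- def oper7(arr, l):
--     n = len(arr)
--     new_arr = [[0]*n for _ in range(n)]
--     s = 2**l
--
--     for x in range(0, n, s):
--         for y in range(0, n, s):
--             tmp = []
--             for i in range(s):
--                 row = []
--                 for j in range(s):
--                     row.append(arr[x+i][y+j])
--                 tmp.append(row)
--
--             for i in range(s):
--                 for j in range(s):
--                     new_arr[i+y][n-s-x+j] = tmp[i][j]
--
--     return new_arr
-- ===== SOURCE B (Python) =====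
-- def oper7(arr, l):
--     n = len(arr)
--     s = 2 ** l
--     b = n // s
--     # b x b grid of s x s blocks, extracted by element indexing
--     blocks = [[[[arr[bi * s + i][bj * s + j] for j in range(s)] for i in range(s)]
--                for bj in range(b)] for bi in range(b)]
--     # rotate the grid of blocks 90 degrees clockwise (blocks kept intact)
--     rot = [[blocks[b - 1 - c][r] for c in range(b)] for r in range(b)]
--     # reassemble
--     return [[rot[r // s][c // s][r % s][c % s] for c in range(n)] for r in range(n)]
-- ===== Notes on version B (the rewrite author's own statement) =====
-- stated objective: alternative
-- what changed: B materialises an explicit b-by-b grid of s-by-s blocks, rotates that grid of blocks 90 degrees clockwise as if blocks were scalars, and reassembles the answer by pure index arithmetic, instead of A's in-place indexed writes into a preallocated zero matrix; Pre_ excludes only inputs where A raises (negative l -> TypeError, s not dividing n or a row shorter than n -> IndexError).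
import Mathlib
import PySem

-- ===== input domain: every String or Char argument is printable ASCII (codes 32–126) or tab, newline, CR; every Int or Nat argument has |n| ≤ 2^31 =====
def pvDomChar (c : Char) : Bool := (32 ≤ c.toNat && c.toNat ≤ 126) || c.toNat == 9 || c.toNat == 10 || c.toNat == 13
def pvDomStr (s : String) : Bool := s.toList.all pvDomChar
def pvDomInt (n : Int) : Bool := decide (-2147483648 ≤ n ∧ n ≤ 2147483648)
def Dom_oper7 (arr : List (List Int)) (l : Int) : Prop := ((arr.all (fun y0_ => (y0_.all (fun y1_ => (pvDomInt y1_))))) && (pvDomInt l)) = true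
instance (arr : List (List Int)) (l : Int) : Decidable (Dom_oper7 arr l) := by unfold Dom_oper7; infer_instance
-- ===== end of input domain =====

-- B replaces A's in-place indexed writes by an explicit grid-of-blocks that is rotated
-- blockwise and reassembled by index arithmetic (objective: alternative decomposition).

-- ===== PORT A =====
-- 2**l (exact for 0 ≤ l; a negative l makes Python's range step a float → TypeError, excluded by Pre_)
def pyPow2 (l : Int) : Nat := 1 <<< l.toNat

-- new_arr[i][j] = v  (totalised form of Python's indexed assignment; exact for in-range indices)
def pvWrite (na : List (List Int)) (i j : Int) (v : Int) : List (List Int) :=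
  PySem.List.pySetD na i (PySem.List.pySetD (PySem.List.pyGetD na i []) j v)

def oper7 (arr : List (List Int)) (l : Int) : List (List Int) :=
  let n : Int := arr.length
  let new0 : List (List Int) := (PySem.List.pyRange 0 n 1).map (fun _ => List.replicate n.toNat (0 : Int))
  let s : Int := (pyPow2 l : Int)
  (PySem.List.pyRange 0 n s).foldl (fun na x =>
    (PySem.List.pyRange 0 n s).foldl (fun na y =>
      let tmp : List (List Int) :=
        (PySem.List.pyRange 0 s 1).foldl (fun tmp i =>
          tmp ++ [(PySem.List.pyRange 0 s 1).foldl (fun row j =>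
            row ++ [PySem.List.pyGetD (PySem.List.pyGetD arr (x + i) []) (y + j) 0]) []]) []
      (PySem.List.pyRange 0 s 1).foldl (fun na i =>
        (PySem.List.pyRange 0 s 1).foldl (fun na j =>
          pvWrite na (i + y) (n - s - x + j) (PySem.List.pyGetD (PySem.List.pyGetD tmp i []) j 0)) na) na) na) new0

-- ===== PORT B =====
def oper7_alt (arr : List (List Int)) (l : Int) : List (List Int) :=
  let n : Int := arr.length
  let s : Int := (pyPow2 l : Int)
  let b : Int := PySem.Int.floordiv n s
  let blocks : List (List (List (List Int))) :=
    (PySem.List.pyRange 0 b 1).map (fun bi =>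
      (PySem.List.pyRange 0 b 1).map (fun bj =>
        (PySem.List.pyRange 0 s 1).map (fun i =>
          (PySem.List.pyRange 0 s 1).map (fun j =>
            PySem.List.pyGetD (PySem.List.pyGetD arr (bi * s + i) []) (bj * s + j) 0))))
  let rot : List (List (List (List Int))) :=
    (PySem.List.pyRange 0 b 1).map (fun r =>
      (PySem.List.pyRange 0 b 1).map (fun c =>
        PySem.List.pyGetD (PySem.List.pyGetD blocks (b - 1 - c) []) r []))
  (PySem.List.pyRange 0 n 1).map (fun r =>
    (PySem.List.pyRange 0 n 1).map (fun c =>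
      PySem.List.pyGetD (PySem.List.pyGetD
        (PySem.List.pyGetD (PySem.List.pyGetD rot (PySem.Int.floordiv r s) []) (PySem.Int.floordiv c s) [])
        (PySem.Int.mod r s) []) (PySem.Int.mod c s) 0))

-- ===== PRECONDITION & SPEC =====
-- Pre_ excludes exactly the inputs where the Python A raises: l < 0 (TypeError: float range
-- step), 2**l not dividing len(arr) (IndexError past the last row), or a row shorter than
-- len(arr) (IndexError reading a row).  On every other input A returns normally.
def Pre_oper7 (arr : List (List Int)) (l : Int) : Prop :=
  0 ≤ l ∧ pyPow2 l ∣ arr.length ∧ ∀ row ∈ arr, arr.length ≤ row.length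
instance (arr : List (List Int)) (l : Int) : Decidable (Pre_oper7 arr l) := by unfold Pre_oper7; infer_instance

def pvWitness_oper7 : List (List Int) × Int := ([[1, 2], [3, 4]], 0)

def Spec_oper7 (arr : List (List Int)) (l : Int) (out : List (List Int)) : Prop := out = oper7_alt arr l
instance (arr : List (List Int)) (l : Int) (out : List (List Int)) : Decidable (Spec_oper7 arr l out) := by unfold Spec_oper7; infer_instance

-- ===== CLAIM (what is proved, stated in full; the proofs are below) =====
def Claim_equal_oper7 : Prop := ∀ (arr : List (List Int)) (l : Int), Dom_oper7 arr l → Pre_oper7 arr l → Spec_oper7 arr l (oper7 arr l)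

-- ===== LEMMAS AND PROOFS =====

-- arr[a][b] totalised with defaults (both ports read only in-range cells under Pre_)
def aget (arr : List (List Int)) (a b : Nat) : Int := (arr.getD a []).getD b 0

-- the common value of cell (r, c) of the result
def finVal (arr : List (List Int)) (s k r c : Nat) : Int :=
  aget arr ((k - 1 - c / s) * s + r % s) ((r / s) * s + c % s)

-- Nat-indexed reformulation of A's loop nest (portA_eq shows oper7 equals this under Pre_)
def opA (arr : List (List Int)) (n s k : Nat) : List (List Int) :=
  (List.range k).foldl (fun na tx =>
    (List.range k).foldl (fun na1 ty =>
      (List.range s).foldl (fun na2 i =>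
        (List.range s).foldl (fun na3 j =>
          pvWrite na3 ((ty * s + i : Nat) : Int) (((k - 1 - tx) * s + j : Nat) : Int)
            (aget arr (tx * s + i) (ty * s + j))) na2) na1) na)
    (List.replicate n (List.replicate n (0 : Int)))

-- matrix invariant: m is an n×n matrix whose cell (r,c) holds f r c
def MatInv (n : Nat) (m : List (List Int)) (f : Nat → Nat → Int) : Prop :=
  m.length = n ∧ (∀ r, r < n → (m.getD r []).length = n) ∧
  (∀ r c, r < n → c < n → (m.getD r []).getD c 0 = f r c)

lemma inv_congr {n : Nat} {m : List (List Int)} {f g : Nat → Nat → Int}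
    (h : MatInv n m f) (hfg : ∀ r c, r < n → c < n → f r c = g r c) : MatInv n m g :=
  ⟨h.1, h.2.1, fun r c hr hc => (h.2.2 r c hr hc).trans (hfg r c hr hc)⟩

lemma inv_init (n : Nat) :
    MatInv n (List.replicate n (List.replicate n (0 : Int))) (fun _ _ => 0) := by
  refine ⟨List.length_replicate, ?_, ?_⟩
  · intro r hr
    rw [List.getD_replicate _ hr, List.length_replicate]
  · intro r c hr hc
    rw [List.getD_replicate _ hr, List.getD_replicate _ hc]

lemma div_mul_add {s b t : Nat} (hs : 0 < s) (ht : t < s) :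
    (b * s + t) / s = b ∧ (b * s + t) % s = t := by
  constructor
  · rw [Nat.mul_comm b s, Nat.mul_add_div hs, Nat.div_eq_of_lt ht]
    omega
  · rw [Nat.mul_comm b s, Nat.mul_add_mod, Nat.mod_eq_of_lt ht]


lemma decomp {s k n r : Nat} (hs : 0 < s) (hn : n = k * s) (hr : r < n) :
    r / s < k ∧ r % s < s ∧ r = (r / s) * s + r % s := by
  refine ⟨(Nat.div_lt_iff_lt_mul hs).2 (hn ▸ hr), Nat.mod_lt _ hs, ?_⟩
  have h := Nat.div_add_mod r s
  rw [Nat.mul_comm s (r / s)] at h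
  omega

lemma inv_write {n : Nat} {m : List (List Int)} {f : Nat → Nat → Int}
    (h : MatInv n m f) {R C : Nat} (hR : R < n) (hC : C < n) (v : Int) :
    MatInv n (pvWrite m (R : Int) (C : Int) v)
      (fun r c => if r = R ∧ c = C then v else f r c) := by
  obtain ⟨h1, h2, h3⟩ := h
  unfold pvWrite
  rw [PySem.List.pyGetD_natCast, PySem.List.pySetD_natCast, PySem.List.pySetD_natCast]
  have hRlen : R < m.length := by omega
  have hrowget : ∀ r : Nat, r < n →
      (m.set R ((m.getD R []).set C v)).getD r [] =
        if R = r then (m.getD R []).set C v else m.getD r [] := by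
    intro r hr
    rw [List.getD_eq_getElem?_getD, List.getElem?_set]
    by_cases hrR : R = r
    · rw [if_pos hrR, if_pos hrR, if_pos hRlen]; rfl
    · rw [if_neg hrR, if_neg hrR, List.getD_eq_getElem?_getD]
  refine ⟨by rw [List.length_set]; exact h1, ?_, ?_⟩
  · intro r hr
    rw [hrowget r hr]
    by_cases hrR : R = r
    · rw [if_pos hrR, List.length_set]; exact h2 R hR
    · rw [if_neg hrR]; exact h2 r hr
  · intro r c hr hc
    simp only []
    rw [hrowget r hr]
    by_cases hrR : R = r
    · rw [if_pos hrR]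
      subst hrR
      have hClen : C < (m.getD R []).length := by rw [h2 R hR]; omega
      rw [List.getD_eq_getElem?_getD, List.getElem?_set]
      by_cases hcC : C = c
      · rw [if_pos hcC, if_pos hClen, if_pos (by omega)]
        rfl
      · rw [if_neg hcC, if_neg (by omega), ← List.getD_eq_getElem?_getD, h3 R c hr hc]
    · rw [if_neg hrR, if_neg (by omega), h3 r c hr hc]

lemma loop_j {n : Nat} {m : List (List Int)} {f : Nat → Nat → Int}
    (h : MatInv n m f) {R B : Nat} (hR : R < n) (v : Nat → Int) (j0 : Nat) (hB : B + j0 ≤ n) :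
    MatInv n ((List.range j0).foldl (fun na j => pvWrite na (R : Int) ((B + j : Nat) : Int) (v j)) m)
      (fun r c => if r = R ∧ B ≤ c ∧ c < B + j0 then v (c - B) else f r c) := by
  induction j0 with
  | zero =>
      refine inv_congr h ?_
      intro r c _ _
      rw [if_neg (by omega)]
  | succ j0 ih =>
      rw [List.range_succ, List.foldl_append, List.foldl_cons, List.foldl_nil]
      have h1 := inv_write (ih (by omega)) (R := R) (C := B + j0) hR (by omega) (v j0)
      refine inv_congr h1 ?_
      intro r c _ _
      by_cases h2 : r = R ∧ c = B + j0
      · rw [if_pos h2, if_pos (by omega), show c - B = j0 by omega]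
      · rw [if_neg h2]
        by_cases h3 : r = R ∧ B ≤ c ∧ c < B + j0
        · rw [if_pos h3, if_pos (by omega)]
        · rw [if_neg h3, if_neg (by omega)]

lemma loop_i {n s : Nat} {m : List (List Int)} {f : Nat → Nat → Int}
    (h : MatInv n m f) {R0 B : Nat} (w : Nat → Nat → Int) (i0 : Nat)
    (hR : R0 + i0 ≤ n) (hB : B + s ≤ n) :
    MatInv n ((List.range i0).foldl (fun na i =>
        (List.range s).foldl (fun na2 j =>
          pvWrite na2 ((R0 + i : Nat) : Int) ((B + j : Nat) : Int) (w i j)) na) m)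
      (fun r c => if R0 ≤ r ∧ r < R0 + i0 ∧ B ≤ c ∧ c < B + s then w (r - R0) (c - B) else f r c) := by
  induction i0 with
  | zero =>
      refine inv_congr h ?_
      intro r c _ _
      rw [if_neg (by omega)]
  | succ i0 ih =>
      rw [List.range_succ, List.foldl_append, List.foldl_cons, List.foldl_nil]
      have h1 := loop_j (ih (by omega)) (R := R0 + i0) (B := B) (by omega) (w i0) s hB
      refine inv_congr h1 ?_
      intro r c _ _
      by_cases h2 : r = R0 + i0 ∧ B ≤ c ∧ c < B + s
      · rw [if_pos h2, if_pos (by omega), show r - R0 = i0 by omega]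
      · rw [if_neg h2]
        by_cases h3 : R0 ≤ r ∧ r < R0 + i0 ∧ B ≤ c ∧ c < B + s
        · rw [if_pos h3, if_pos (by omega)]
        · rw [if_neg h3, if_neg (by omega)]

lemma loop_y {n s k : Nat} (hs : 0 < s) (hn : n = k * s)
    (arr : List (List Int)) {m : List (List Int)} {f : Nat → Nat → Int}
    (h : MatInv n m f) {tx : Nat} (htx : tx < k) (y0 : Nat) (hy0 : y0 ≤ k) :
    MatInv n ((List.range y0).foldl (fun na ty =>
        (List.range s).foldl (fun na2 i =>
          (List.range s).foldl (fun na3 j =>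
            pvWrite na3 ((ty * s + i : Nat) : Int) (((k - 1 - tx) * s + j : Nat) : Int)
              (aget arr (tx * s + i) (ty * s + j))) na2) na) m)
      (fun r c => if r < y0 * s ∧ (k - 1 - tx) * s ≤ c ∧ c < (k - 1 - tx) * s + s
        then aget arr (tx * s + r % s) ((r / s) * s + c % s) else f r c) := by
  have hBs : (k - 1 - tx) * s + s ≤ n := by
    have h1 : (k - 1 - tx) * s + s = (k - 1 - tx + 1) * s := (Nat.succ_mul _ _).symm
    have h2 : (k - 1 - tx + 1) * s ≤ k * s := Nat.mul_le_mul_right s (by omega)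
    omega
  induction y0 with
  | zero =>
      refine inv_congr h ?_
      intro r c _ _
      rw [if_neg (by omega)]
  | succ y0 ih =>
      rw [List.range_succ, List.foldl_append, List.foldl_cons, List.foldl_nil]
      have hR : y0 * s + s ≤ n := by
        have h1 : y0 * s + s = (y0 + 1) * s := (Nat.succ_mul _ _).symm
        have h2 : (y0 + 1) * s ≤ k * s := Nat.mul_le_mul_right s (by omega)
        omega
      have h1 := loop_i (ih (by omega)) (R0 := y0 * s) (B := (k - 1 - tx) * s)
        (fun i j => aget arr (tx * s + i) (y0 * s + j)) s hR hBs
      have hsucc1 : y0.succ * s = y0 * s + s := Nat.succ_mul y0 s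
      have hsucc2 : (y0 + 1) * s = y0 * s + s := Nat.succ_mul y0 s
      refine inv_congr h1 ?_
      intro r c _ _
      by_cases h2 : y0 * s ≤ r ∧ r < y0 * s + s ∧ (k - 1 - tx) * s ≤ c ∧ c < (k - 1 - tx) * s + s
      · have hdm := div_mul_add (b := y0) (t := r - y0 * s) hs (by omega)
        have hdm2 := div_mul_add (b := k - 1 - tx) (t := c - (k - 1 - tx) * s) hs (by omega)
        rw [show y0 * s + (r - y0 * s) = r by omega] at hdm
        rw [show (k - 1 - tx) * s + (c - (k - 1 - tx) * s) = c by omega] at hdm2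
        rw [if_pos h2, if_pos (by omega)]
        rw [show r - y0 * s = r % s by omega, show c - (k - 1 - tx) * s = c % s by omega,
          show y0 * s = (r / s) * s by rw [hdm.1]]
      · rw [if_neg h2]
        by_cases h3 : r < y0 * s ∧ (k - 1 - tx) * s ≤ c ∧ c < (k - 1 - tx) * s + s
        · rw [if_pos h3, if_pos (by omega)]
        · rw [if_neg h3, if_neg (by omega)]

lemma loop_x {n s k : Nat} (hs : 0 < s) (hn : n = k * s)
    (arr : List (List Int)) {m : List (List Int)} {f : Nat → Nat → Int}
    (h : MatInv n m f) (x0 : Nat) (hx0 : x0 ≤ k) :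
    MatInv n ((List.range x0).foldl (fun na tx =>
        (List.range k).foldl (fun na1 ty =>
          (List.range s).foldl (fun na2 i =>
            (List.range s).foldl (fun na3 j =>
              pvWrite na3 ((ty * s + i : Nat) : Int) (((k - 1 - tx) * s + j : Nat) : Int)
                (aget arr (tx * s + i) (ty * s + j))) na2) na1) na) m)
      (fun r c => if (k - x0) * s ≤ c then finVal arr s k r c else f r c) := by
  induction x0 with
  | zero =>
      refine inv_congr h ?_
      intro r c _ hc
      have h0 : (k - 0) * s = k * s := by rw [Nat.sub_zero]
      rw [if_neg (by omega)]
  | succ x0 ih =>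
      rw [List.range_succ, List.foldl_append, List.foldl_cons, List.foldl_nil]
      have h1 := loop_y hs hn arr (ih (by omega)) (tx := x0) (by omega) k le_rfl
      have hband : (k - 1 - x0) * s + s = (k - x0) * s := by
        rw [show k - x0 = k - 1 - x0 + 1 by omega, Nat.succ_mul]
      have hband2 : (k - (x0 + 1)) * s = (k - 1 - x0) * s := by
        rw [show k - (x0 + 1) = k - 1 - x0 by omega]
      have hband3 : (k - x0.succ) * s = (k - 1 - x0) * s := by
        rw [show k - x0.succ = k - 1 - x0 by omega]
      refine inv_congr h1 ?_
      intro r c hr hc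
      by_cases h2 : r < k * s ∧ (k - 1 - x0) * s ≤ c ∧ c < (k - 1 - x0) * s + s
      · have hdm2 := div_mul_add (b := k - 1 - x0) (t := c - (k - 1 - x0) * s) hs (by omega)
        rw [show (k - 1 - x0) * s + (c - (k - 1 - x0) * s) = c by omega] at hdm2
        rw [if_pos h2, if_pos (by omega)]
        unfold finVal
        rw [hdm2.1, show k - 1 - (k - 1 - x0) = x0 by omega]
      · rw [if_neg h2]
        by_cases h3 : (k - x0) * s ≤ c
        · rw [if_pos h3, if_pos (by omega)]
        · rw [if_neg h3, if_neg (by omega)]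

lemma inv_opA {n s k : Nat} (hs : 0 < s) (hn : n = k * s) (arr : List (List Int)) :
    MatInv n (opA arr n s k) (finVal arr s k) := by
  have h := loop_x hs hn arr (inv_init n) k le_rfl
  unfold opA
  refine inv_congr h ?_
  intro r c _ _
  have h0 : (k - k) * s = 0 := by rw [Nat.sub_self, Nat.zero_mul]
  rw [if_pos (by omega)]

lemma inv_eq_grid {n : Nat} {m : List (List Int)} {f : Nat → Nat → Int} (h : MatInv n m f) :
    m = (List.range n).map (fun r => (List.range n).map (fun c => f r c)) := by
  obtain ⟨h1, h2, h3⟩ := h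
  apply List.ext_getElem (by simp [h1])
  intro r hr1 hr2
  have hrn : r < n := by omega
  have hgd : m.getD r [] = m[r] := by
    rw [List.getD_eq_getElem?_getD, List.getElem?_eq_getElem hr1]
    rfl
  rw [List.getElem_map, List.getElem_range]
  apply List.ext_getElem (by rw [← hgd, h2 r hrn]; simp)
  intro c hc1 hc2
  have hcn : c < n := by rw [← hgd, h2 r hrn] at hc1; omega
  have hgd2 : m[r].getD c 0 = m[r][c] := by
    rw [List.getD_eq_getElem?_getD, List.getElem?_eq_getElem hc1]
    rfl
  rw [List.getElem_map, List.getElem_range, ← hgd2, ← hgd, h3 r c hrn hcn]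

lemma pow2_pos (l : Int) : 0 < pyPow2 l := by
  unfold pyPow2
  rw [Nat.shiftLeft_eq]
  positivity

-- range(0, n, s) as a Nat-indexed map, when s divides n (k = n / s)
lemma pyRange_step {n s k : Nat} (hs : 0 < s) (hn : n = k * s) :
    PySem.List.pyRange 0 (n : Int) (s : Int) =
      (List.range k).map (fun t : Nat => ((s : Int) * (t : Int))) := by
  rw [PySem.List.pyRange_of_pos 0 (n : Int) (by exact_mod_cast hs)]
  have hcount : (if (0 : Int) < (n : Int) then (((n : Int) - 0 + (s : Int) - 1) / (s : Int)).toNat else 0) = k := by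
    by_cases h0 : 0 < n
    · rw [if_pos (by exact_mod_cast h0)]
      rw [show ((n : Int) - 0 + (s : Int) - 1) = ((n + s - 1 : Nat) : Int) by omega]
      rw [← Int.natCast_div, Int.toNat_natCast, hn]
      rw [show k * s + s - 1 = s * k + (s - 1) by rw [Nat.mul_comm s k]; omega]
      rw [Nat.mul_add_div hs, Nat.div_eq_of_lt (by omega)]
      omega
    · rw [if_neg (by omega)]
      rcases Nat.mul_eq_zero.1 (show k * s = 0 by omega) with h | h
      · omega
      · omega
  rw [hcount]
  exact List.map_congr_left (fun t _ => by rw [zero_add])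

lemma portA_eq (arr : List (List Int)) (l : Int) (k : Nat)
    (hn : arr.length = k * pyPow2 l) :
    oper7 arr l = opA arr arr.length (pyPow2 l) k := by
  have hs : 0 < pyPow2 l := pow2_pos l
  unfold oper7 opA
  simp only [Int.toNat_natCast]
  rw [pyRange_step hs hn]
  have hnew : (PySem.List.pyRange 0 (arr.length : Int) 1).map
      (fun _ => List.replicate arr.length (0 : Int)) =
      List.replicate arr.length (List.replicate arr.length (0 : Int)) := by
    rw [List.eq_replicate_iff]
    refine ⟨by simp [PySem.List.length_pyRange_one], ?_⟩
    intro x hx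
    rcases List.mem_map.1 hx with ⟨t, _, ht⟩
    exact ht.symm
  rw [hnew]
  simp only [PySem.List.pyRange_one, sub_zero, Int.toNat_natCast, zero_add, List.foldl_map,
    PySem.List.foldl_append_singleton_eq_map, List.nil_append]
  refine PySem.List.foldl_congr_mem _ _ _ _ ?_
  intro na0 tx htx
  rw [List.mem_range] at htx
  refine PySem.List.foldl_congr_mem _ _ _ _ ?_
  intro na1 ty hty
  rw [List.mem_range] at hty
  refine PySem.List.foldl_congr_mem _ _ _ _ ?_
  intro na2 i hi
  rw [List.mem_range] at hi
  refine PySem.List.foldl_congr_mem _ _ _ _ ?_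
  intro na3 j hj
  rw [List.mem_range] at hj
  rw [show ((i : Int) + (pyPow2 l : Int) * (ty : Int)) = ((ty * pyPow2 l + i : Nat) : Int) by
    push_cast; ring]
  rw [show ((arr.length : Int) - (pyPow2 l : Int) - (pyPow2 l : Int) * (tx : Int) + (j : Int))
      = (((k - 1 - tx) * pyPow2 l + j : Nat) : Int) by
    obtain ⟨a, ha⟩ : ∃ a, k = a + tx + 1 := ⟨k - tx - 1, by omega⟩
    subst ha
    rw [show a + tx + 1 - 1 - tx = a by omega, hn]
    push_cast; ring]
  congr 1
  simp only [PySem.List.pyGetD_natCast, PySem.List.getD_map_range, hi, hj]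
  rw [show ((pyPow2 l : Int) * (tx : Int) + (i : Int)) = ((tx * pyPow2 l + i : Nat) : Int) by
    push_cast; ring]
  rw [show ((pyPow2 l : Int) * (ty : Int) + (j : Int)) = ((ty * pyPow2 l + j : Nat) : Int) by
    push_cast; ring]
  simp only [PySem.List.pyGetD_natCast]
  rfl

lemma portB_eq (arr : List (List Int)) (l : Int) (k : Nat)
    (hn : arr.length = k * pyPow2 l) :
    oper7_alt arr l = (List.range arr.length).map (fun r =>
      (List.range arr.length).map (fun c => finVal arr (pyPow2 l) k r c)) := by
  have hs : 0 < pyPow2 l := pow2_pos l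
  have hdivk : arr.length / pyPow2 l = k := by
    have h' := (div_mul_add (b := k) (t := 0) hs hs).1
    rw [Nat.add_zero] at h'
    rw [hn, h']
  have hb : PySem.Int.floordiv (arr.length : Int) ((pyPow2 l : Nat) : Int) = ((k : Nat) : Int) := by
    rw [PySem.Int.floordiv_natCast, hdivk]
  unfold oper7_alt
  simp only [hb]
  simp only [PySem.List.pyRange_one, sub_zero, Int.toNat_natCast, zero_add, List.map_map]
  apply List.map_congr_left
  intro r hr
  rw [List.mem_range] at hr
  simp only [Function.comp_apply]
  apply List.map_congr_left
  intro c hc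
  rw [List.mem_range] at hc
  simp only [Function.comp_apply]
  have hk0 : 0 < k := by
    rcases Nat.eq_zero_or_pos k with h | h
    · rw [h, Nat.zero_mul] at hn; omega
    · exact h
  have hrd := decomp hs hn hr
  have hcd := decomp hs hn hc
  have hd1 : r / pyPow2 l < k := hrd.1
  have hd2 : c / pyPow2 l < k := hcd.1
  have hm1 : r % pyPow2 l < pyPow2 l := hrd.2.1
  have hm2 : c % pyPow2 l < pyPow2 l := hcd.2.1
  have hbi : k - 1 - c / pyPow2 l < k :=
    lt_of_le_of_lt (Nat.sub_le (k - 1) _) (Nat.sub_lt hk0 Nat.one_pos)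
  have hcast : ((k : Int) - 1 - ((c / pyPow2 l : Nat) : Int)) = ((k - 1 - c / pyPow2 l : Nat) : Int) := by
    rw [Nat.cast_sub (Nat.le_sub_one_of_lt hd2), Nat.cast_sub hk0, Nat.cast_one]
  simp only [PySem.Int.floordiv_natCast, PySem.Int.mod_natCast, PySem.List.pyGetD_natCast,
    PySem.List.getD_map_range, Function.comp_apply, hd1, hd2]
  rw [hcast]
  simp only [PySem.List.pyGetD_natCast, PySem.List.getD_map_range, Function.comp_apply,
    hd1, hm1, hm2, hbi]
  rw [show (((k - 1 - c / pyPow2 l : Nat) : Int) * (pyPow2 l : Int) + ((r % pyPow2 l : Nat) : Int))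
      = (((k - 1 - c / pyPow2 l) * pyPow2 l + r % pyPow2 l : Nat) : Int) by push_cast; ring]
  rw [show (((r / pyPow2 l : Nat) : Int) * (pyPow2 l : Int) + ((c % pyPow2 l : Nat) : Int))
      = (((r / pyPow2 l) * pyPow2 l + c % pyPow2 l : Nat) : Int) by push_cast; ring]
  simp only [PySem.List.pyGetD_natCast]
  rfl

-- ===== VERDICT (by name: the statement is the Claim_ definition above) =====
theorem oper7_spec : Claim_equal_oper7 := by
  unfold Claim_equal_oper7
  intro arr l _ hpre
  obtain ⟨_, hdvd, _⟩ := hpre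
  obtain ⟨k, hk⟩ := hdvd
  have hn : arr.length = k * pyPow2 l := by rw [hk]; ring
  unfold Spec_oper7
  rw [portA_eq arr l k hn, portB_eq arr l k hn]
  exact inv_eq_grid (inv_opA (pow2_pos l) hn arr)
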